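-- pv_equiv track=rewrite | github.com/Yizhen-Zheng/leetcode | NC-most-duplicate-sigment/1.py | solveV
-- ===== SOURCE A (Python) =====
-- def solveV(nums: list, n: int):
--     '''
--     map s, e and count(just like count parentheses)
--     sort: O(nlogn)
--     count: O(nlogn)
--         heap up/down: O(logn)
--         pop / push operation time for each segment: 1 time
--         total pop/push operations: n
--
--     '''
--     events = []
--     for s, e in nums:
--         events.append((s, 1))
--         events.append((e, -1))
--     events.sort()
--     cur_count = 0
--     max_count = 0
--     for _, delta in events:
--         cur_count += delta
--         max_count = max(max_count, cur_count)
--     return max_count if max_count > 1 else 0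
-- ===== SOURCE B (Python) =====
-- def solveV(nums: list, n: int):
--     # Rank-query approach: sort start and end coordinates once; for each segment
--     # start s, the overlap just after coordinate s is rank(starts, s) - rank(ends, s),
--     # each rank answered by an independent binary search (no merged event timeline,
--     # no running counter carried along a sweep).
--     def bisect_right(a, x):
--         lo, hi = 0, len(a)
--         while lo < hi:
--             mid = (lo + hi) // 2
--             if x < a[mid]:
--                 hi = mid
--             else:
--                 lo = mid + 1
--         return lo
--     starts = sorted(s for s, _ in nums)
--     ends = sorted(e for _, e in nums)
--     best = 0
--     for s, _ in nums:
--         here = bisect_right(starts, s) - bisect_right(ends, s)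
--         if here > best:
--             best = here
--     return best if best > 1 else 0
-- ===== Notes on version B (the rewrite author's own statement) =====
-- stated objective: alternative
-- what changed: A sweeps one merged sorted (coord, delta) event list with a running counter; B never builds events or carries a counter: it sorts start and end coordinates separately and, for each segment start s, answers the overlap after s as bisect_right(starts, s) - bisect_right(ends, s), two independent binary-search rank queries, keeping the best.
import Mathlib
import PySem

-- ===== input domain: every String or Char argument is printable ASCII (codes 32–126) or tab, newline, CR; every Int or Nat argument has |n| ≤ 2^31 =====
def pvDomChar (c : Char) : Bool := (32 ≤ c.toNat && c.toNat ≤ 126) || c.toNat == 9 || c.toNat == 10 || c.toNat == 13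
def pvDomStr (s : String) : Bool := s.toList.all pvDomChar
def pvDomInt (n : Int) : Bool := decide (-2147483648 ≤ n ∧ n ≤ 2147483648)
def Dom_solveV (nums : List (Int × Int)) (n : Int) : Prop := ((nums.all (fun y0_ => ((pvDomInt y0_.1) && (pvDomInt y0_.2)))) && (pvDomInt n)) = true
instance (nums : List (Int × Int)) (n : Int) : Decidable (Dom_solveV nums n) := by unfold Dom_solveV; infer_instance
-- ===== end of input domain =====

-- B replaces A's sorted-event sweep with its running counter by independent
-- rank queries: for each segment start s, two binary searches give the overlap
-- just after s, and the answer is the best such value (alternative algorithm).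

-- ===== PORT A =====
def solveV (nums : List (Int × Int)) (n : Int) : Int :=
  -- events = []; for s, e in nums: events.append((s, 1)); events.append((e, -1))
  let events : List (Int × Int) :=
    nums.foldl (fun ev p => (ev ++ [(p.1, (1 : Int))]) ++ [(p.2, (-1 : Int))]) []
  -- events.sort()  (tuples compare lexicographically)
  let events := PySem.List.sorted2 events Prod.fst Prod.snd
  -- cur_count = 0; max_count = 0; for _, delta in events: ...
  let st := events.foldl (fun (st : Int × Int) ev => (st.1 + ev.2, max st.2 (st.1 + ev.2))) (0, 0)
  if st.2 > 1 then st.2 else 0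

-- ===== PORT B =====
-- Source B's hand-written bisect_right is exactly Python's bisect.bisect_right loop
-- (lo/hi, mid=(lo+hi)//2, 'if x < a[mid]: hi = mid else: lo = mid+1'), which is
-- PySem.List.bisectRight step for step.
def solveV_alt (nums : List (Int × Int)) (n : Int) : Int :=
  let starts := PySem.List.sorted (nums.map Prod.fst) (fun x => x)
  let ends := PySem.List.sorted (nums.map Prod.snd) (fun x => x)
  let best := nums.foldl (fun best p =>
    let here : Int := (PySem.List.bisectRight starts p.1 : Int)
                      - (PySem.List.bisectRight ends p.1 : Int)
    if here > best then here else best) 0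
  if best > 1 then best else 0

-- ===== PRECONDITION & SPEC =====
def Spec_solveV (nums : List (Int × Int)) (n : Int) (out : Int) : Prop := out = solveV_alt nums n
instance (nums : List (Int × Int)) (n : Int) (out : Int) : Decidable (Spec_solveV nums n out) := by unfold Spec_solveV; infer_instance

-- ===== CLAIM (what is proved, stated in full; the proofs are below) =====
def Claim_equal_solveV : Prop := ∀ (nums : List (Int × Int)) (n : Int), Dom_solveV nums n → Spec_solveV nums n (solveV nums n)

-- ===== LEMMAS AND PROOFS =====

-- Python's lexicographic ≤ on the (coordinate, delta) event pairs
def lexLe (p q : Int × Int) : Prop := p.1 < q.1 ∨ (p.1 = q.1 ∧ p.2 ≤ q.2)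

-- the merge of the two sorted coordinate lists into the sorted event list,
-- ends (delta -1) before starts (delta +1) at equal coordinates
def mergeE : List Int → List Int → List (Int × Int)
  | [], es => es.map (fun e => (e, (-1 : Int)))
  | s :: ss, [] => (s, (1 : Int)) :: mergeE ss []
  | s :: ss, e :: es =>
    if e ≤ s then (e, (-1 : Int)) :: mergeE (s :: ss) es
    else (s, (1 : Int)) :: mergeE ss (e :: es)

def stepA (st : Int × Int) (ev : Int × Int) : Int × Int := (st.1 + ev.2, max st.2 (st.1 + ev.2))

-- #{y ∈ l : y ≤ x} as an Int
def cntLE (l : List Int) (x : Int) : Int := (l.countP (fun y => decide (y ≤ x)) : Int)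

-- fold that keeps the running maximum of f over a list
def mfold (f : Int → Int) (m : Int) (l : List Int) : Int :=
  l.foldl (fun b t => max b (f t)) m

lemma mergeE_perm : ∀ (ss es : List Int),
    (mergeE ss es).Perm (ss.map (fun s => (s, (1 : Int))) ++ es.map (fun e => (e, (-1 : Int))))
  | [], es => by simp [mergeE]
  | s :: ss, [] => by
    simpa [mergeE] using (mergeE_perm ss []).cons (s, (1 : Int))
  | s :: ss, e :: es => by
    by_cases h : e ≤ s
    · simp only [mergeE, if_pos h]
      refine ((mergeE_perm (s :: ss) es).cons (e, (-1 : Int))).trans ?_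
      simpa using (List.perm_middle (a := (e, (-1 : Int)))
        (l₁ := (s, (1:Int)) :: ss.map (fun s => (s, (1:Int))))
        (l₂ := es.map (fun e => (e, (-1:Int))))).symm
    · simp only [mergeE, if_neg h]
      simpa using (mergeE_perm ss (e :: es)).cons (s, (1 : Int))

lemma mem_mergeE {ss es : List Int} {z : Int × Int} (hz : z ∈ mergeE ss es) :
    (z.2 = 1 ∧ z.1 ∈ ss) ∨ (z.2 = -1 ∧ z.1 ∈ es) := by
  have := (mergeE_perm ss es).mem_iff.mp hz
  rcases List.mem_append.mp this with h | h
  · rcases List.mem_map.mp h with ⟨x, hx, rfl⟩; exact Or.inl ⟨rfl, hx⟩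
  · rcases List.mem_map.mp h with ⟨x, hx, rfl⟩; exact Or.inr ⟨rfl, hx⟩

lemma mergeE_pairwise : ∀ (ss es : List Int),
    ss.Pairwise (· ≤ ·) → es.Pairwise (· ≤ ·) → (mergeE ss es).Pairwise lexLe
  | [], es, _, hes => by
    simp only [mergeE]
    exact List.Pairwise.map _ (fun {a b} hab => Or.elim (lt_or_eq_of_le hab)
      (fun h => Or.inl h) (fun h => Or.inr ⟨h, le_refl _⟩)) hes
  | s :: ss, [], hss, hes => by
    simp only [mergeE]
    refine List.Pairwise.cons ?_ (mergeE_pairwise ss [] hss.tail hes)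
    intro z hz
    rcases mem_mergeE hz with ⟨h2, h1⟩ | ⟨h2, h1⟩
    · have := List.rel_of_pairwise_cons hss h1
      exact Or.elim (lt_or_eq_of_le this) (fun h => Or.inl h) (fun h => Or.inr ⟨h, by omega⟩)
    · simp at h1
  | s :: ss, e :: es, hss, hes => by
    by_cases h : e ≤ s
    · simp only [mergeE, if_pos h]
      refine List.Pairwise.cons ?_ (mergeE_pairwise (s :: ss) es hss hes.tail)
      intro z hz
      rcases mem_mergeE hz with ⟨h2, h1⟩ | ⟨h2, h1⟩
      · have hsx : s ≤ z.1 := by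
          rcases List.mem_cons.mp h1 with rfl | h1
          · exact le_refl _
          · exact List.rel_of_pairwise_cons hss h1
        rcases lt_or_eq_of_le (le_trans h hsx) with hlt | heq
        · exact Or.inl hlt
        · exact Or.inr ⟨heq, by omega⟩
      · have := List.rel_of_pairwise_cons hes h1
        exact Or.elim (lt_or_eq_of_le this) (fun hl => Or.inl hl) (fun he => Or.inr ⟨he, by omega⟩)
    · simp only [mergeE, if_neg h]
      refine List.Pairwise.cons ?_ (mergeE_pairwise ss (e :: es) hss.tail hes)
      intro z hz
      rcases mem_mergeE hz with ⟨h2, h1⟩ | ⟨h2, h1⟩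
      · have := List.rel_of_pairwise_cons hss h1
        exact Or.elim (lt_or_eq_of_le this) (fun hl => Or.inl hl) (fun he => Or.inr ⟨he, by omega⟩)
      · have he' : e ≤ z.1 := by
          rcases List.mem_cons.mp h1 with rfl | h1
          · exact le_refl _
          · exact List.rel_of_pairwise_cons hes h1
        exact Or.inl (lt_of_lt_of_le (by omega) he')

-- the boolean 'before' predicate sorted2 uses for a two-component key
def lexB (a b : Int × Int) : Bool :=
  decide (a.1 < b.1) || (!decide (b.1 < a.1) && decide (a.2 < b.2))

lemma lexB_true {a b : Int × Int} (h : lexB a b = true) : lexLe a b := by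
  unfold lexB at h; unfold lexLe
  simp only [Bool.or_eq_true, Bool.and_eq_true, Bool.not_eq_true', decide_eq_true_eq,
    decide_eq_false_iff_not] at h
  omega

lemma lexB_false {a b : Int × Int} (h : lexB a b = false) : lexLe b a := by
  unfold lexB at h; unfold lexLe
  simp only [Bool.or_eq_false_iff, Bool.and_eq_false_iff, Bool.not_eq_false', decide_eq_true_eq,
    decide_eq_false_iff_not] at h
  omega

lemma lexLe_trans {a b c : Int × Int} (h1 : lexLe a b) (h2 : lexLe b c) : lexLe a c := by
  unfold lexLe at *; omega

lemma insertBy_lex_pairwise (x : Int × Int) :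
    ∀ (ys : List (Int × Int)), ys.Pairwise lexLe → (PySem.List.insertBy lexB x ys).Pairwise lexLe
  | [], _ => by simp [PySem.List.insertBy]
  | y :: ys, hys => by
    unfold PySem.List.insertBy
    by_cases h : lexB x y = true
    · simp only [h, if_true]
      refine List.Pairwise.cons ?_ hys
      intro z hz
      rcases List.mem_cons.mp hz with rfl | hz
      · exact lexB_true h
      · exact lexLe_trans (lexB_true h) (List.rel_of_pairwise_cons hys hz)
    · simp only [h]
      refine List.Pairwise.cons ?_ (insertBy_lex_pairwise x ys hys.tail)
      intro z hz
      rcases (PySem.List.mem_insertBy lexB x z ys).mp hz with rfl | hz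
      · exact lexB_false (by simpa using h)
      · exact List.rel_of_pairwise_cons hys hz

lemma foldl_insertBy_pairwise : ∀ (xs acc : List (Int × Int)), acc.Pairwise lexLe →
    (xs.foldl (fun acc x => PySem.List.insertBy lexB x acc) acc).Pairwise lexLe
  | [], acc, hacc => hacc
  | x :: xs, acc, hacc =>
    foldl_insertBy_pairwise xs _ (insertBy_lex_pairwise x acc hacc)

lemma sorted2_events_pairwise (xs : List (Int × Int)) :
    (PySem.List.sorted2 xs Prod.fst Prod.snd).Pairwise lexLe := by
  have : PySem.List.sorted2 xs Prod.fst Prod.snd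
      = xs.foldl (fun acc x => PySem.List.insertBy lexB x acc) [] := by
    simp only [PySem.List.sorted2]
    rfl
  rw [this]
  exact foldl_insertBy_pairwise xs [] (by simp)

-- A's event-building loop is a flatMap
lemma eventsFold_eq (nums : List (Int × Int)) :
    nums.foldl (fun ev p => (ev ++ [(p.1, (1 : Int))]) ++ [(p.2, (-1 : Int))]) []
      = nums.flatMap (fun p => [(p.1, (1 : Int)), (p.2, (-1 : Int))]) := by
  have h : ∀ (l : List (Int × Int)) (acc : List (Int × Int)),
      l.foldl (fun ev p => (ev ++ [(p.1, (1 : Int))]) ++ [(p.2, (-1 : Int))]) acc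
        = acc ++ l.flatMap (fun p => [(p.1, (1 : Int)), (p.2, (-1 : Int))]) := by
    intro l
    induction l with
    | nil => simp
    | cons p l ih => intro acc; simp [ih, List.append_assoc, List.flatMap_def]
  simpa using h nums []

lemma flatMap_perm_split (nums : List (Int × Int)) :
    (nums.flatMap (fun p => [(p.1, (1 : Int)), (p.2, (-1 : Int))])).Perm
      (nums.map (fun p => (p.1, (1 : Int))) ++ nums.map (fun p => (p.2, (-1 : Int)))) := by
  induction nums with
  | nil => simp
  | cons p l ih =>
    simp only [List.flatMap_cons, List.map_cons, List.cons_append]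
    refine List.Perm.cons _ ?_
    refine (ih.cons (p.2, (-1 : Int))).trans ?_
    exact (List.perm_middle (a := (p.2, (-1 : Int)))
      (l₁ := l.map (fun p => (p.1, (1:Int)))) (l₂ := l.map (fun p => (p.2, (-1:Int))))).symm

-- the central identity: A's sorted event list IS the merge of the two sorted lists
lemma sorted2_eq_mergeE (nums : List (Int × Int)) :
    PySem.List.sorted2
        (nums.foldl (fun ev p => (ev ++ [(p.1, (1 : Int))]) ++ [(p.2, (-1 : Int))]) [])
        Prod.fst Prod.snd
      = mergeE (PySem.List.sorted (nums.map Prod.fst) (fun x => x))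
               (PySem.List.sorted (nums.map Prod.snd) (fun x => x)) := by
  set S := PySem.List.sorted (nums.map Prod.fst) (fun x => x) with hS
  set E := PySem.List.sorted (nums.map Prod.snd) (fun x => x) with hE
  set ev := nums.foldl (fun ev p => (ev ++ [(p.1, (1 : Int))]) ++ [(p.2, (-1 : Int))]) [] with hev
  have hperm : (PySem.List.sorted2 ev Prod.fst Prod.snd).Perm (mergeE S E) := by
    refine (PySem.List.sorted2_perm ev Prod.fst Prod.snd false).trans ?_
    rw [hev, eventsFold_eq]
    refine (flatMap_perm_split nums).trans ?_
    refine List.Perm.trans ?_ (mergeE_perm S E).symm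
    refine List.Perm.append ?_ ?_
    · have : S.Perm (nums.map Prod.fst) := PySem.List.sorted_perm _ _ _
      simpa [Function.comp] using (this.map (fun s => (s, (1 : Int)))).symm
    · have : E.Perm (nums.map Prod.snd) := PySem.List.sorted_perm _ _ _
      simpa [Function.comp] using (this.map (fun e => (e, (-1 : Int)))).symm
  refine List.eq_of_perm_of_sorted ?_ (sorted2_events_pairwise ev) ?_ hperm
  · intro a b _ _ h1 h2
    unfold lexLe at h1 h2
    have : a.1 = b.1 ∧ a.2 = b.2 := by omega
    exact Prod.ext this.1 this.2
  · exact mergeE_pairwise S E (PySem.List.sorted_pairwise _ _) (PySem.List.sorted_pairwise _ _)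

-- a run of -1 events never raises the max once cur ≤ max
lemma foldl_ends_only : ∀ (es : List Int) (cur mx : Int), cur ≤ mx →
    ((es.map (fun e => (e, (-1 : Int)))).foldl stepA (cur, mx)).2 = mx
  | [], cur, mx, h => rfl
  | e :: es, cur, mx, h => by
    simp only [List.map_cons, List.foldl_cons, stepA]
    have : max mx (cur + -1) = mx := by omega
    rw [this]
    exact foldl_ends_only es (cur - 1) mx (by omega)

-- ---- generic facts about mfold ----
lemma le_mfold_init (f : Int → Int) : ∀ (l : List Int) (m : Int), m ≤ mfold f m l
  | [], m => le_refl m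
  | t :: l, m => le_trans (le_max_left m (f t)) (le_mfold_init f l (max m (f t)))

lemma f_le_mfold (f : Int → Int) : ∀ (l : List Int) (m t : Int), t ∈ l → f t ≤ mfold f m l
  | [], m, t, ht => by simp at ht
  | u :: l, m, t, ht => by
    rcases List.mem_cons.mp ht with rfl | ht
    · exact le_trans (le_max_right m (f t)) (le_mfold_init f l _)
    · exact f_le_mfold f l _ t ht

lemma mfold_start (f : Int → Int) : ∀ (l : List Int) (m v : Int),
    mfold f (max m v) l = max (mfold f m l) v
  | [], m, v => rfl
  | t :: l, m, v => by
    show mfold f (max (max m v) (f t)) l = max (mfold f (max m (f t)) l) v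
    rw [max_right_comm, mfold_start f l (max m (f t)) v]

lemma mfold_cons (f : Int → Int) (m t : Int) (l : List Int) :
    mfold f m (t :: l) = mfold f (max m (f t)) l := rfl

lemma mfold_congr (f g : Int → Int) (l : List Int) (m : Int)
    (h : ∀ t ∈ l, f t = g t) : mfold f m l = mfold g m l := by
  unfold mfold
  exact PySem.List.foldl_congr_mem l _ _ m (fun acc x hx => by rw [h x hx])

lemma mfold_perm (f : Int → Int) {l l' : List Int} (hp : l.Perm l') (m : Int) :
    mfold f m l = mfold f m l' := by
  induction hp generalizing m with
  | nil => rfl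
  | cons x _ ih => exact ih _
  | swap x y l =>
    show mfold f (max (max m (f y)) (f x)) l = mfold f (max (max m (f x)) (f y)) l
    rw [max_right_comm]
  | trans _ _ ih1 ih2 => exact (ih1 m).trans (ih2 m)

-- absorption of a padded start value into the fold
lemma mfold_pad (g : Int → Int) (m c k : Int) (ss : List Int)
    (hk0 : 0 ≤ k) (hwit : 0 < k → ∃ t0 ∈ ss, g t0 = c + 1 + k) :
    mfold g (max m (c + 1 + k)) ss = mfold g (max m (c + 1)) ss := by
  have h1 : max m (c + 1 + k) = max (max m (c + 1)) (c + 1 + k) := by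
    rw [max_assoc, max_eq_right (by omega : (c + 1 : Int) ≤ c + 1 + k)]
  rw [h1, mfold_start]
  apply max_eq_left
  rcases eq_or_lt_of_le hk0 with hk | hk
  · have h2 : (c + 1 : Int) ≤ max m (c + 1) := le_max_right _ _
    have h3 := le_mfold_init g ss (max m (c + 1))
    have : c + 1 + k = c + 1 := by omega
    rw [this]; exact le_trans h2 h3
  · obtain ⟨t0, ht0, hg⟩ := hwit hk
    exact hg ▸ f_le_mfold g ss (max m (c + 1)) t0 ht0

lemma cntLE_nil (x : Int) : cntLE [] x = 0 := rfl

lemma cntLE_cons_le {y x : Int} (l : List Int) (h : y ≤ x) :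
    cntLE (y :: l) x = 1 + cntLE l x := by
  unfold cntLE
  rw [List.countP_cons]
  simp only [decide_eq_true_eq, if_pos h]
  push_cast; ring

lemma cntLE_nonneg (l : List Int) (x : Int) : 0 ≤ cntLE l x := Int.natCast_nonneg _

lemma cntLE_pos_mem {l : List Int} {x : Int} (h : 0 < cntLE l x) : ∃ t ∈ l, t ≤ x := by
  unfold cntLE at h
  have : 0 < l.countP (fun y => decide (y ≤ x)) := by exact_mod_cast h
  obtain ⟨t, ht, hp⟩ := List.countP_pos_iff.mp this
  exact ⟨t, ht, by simpa using hp⟩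

lemma cntLE_eq_zero {l : List Int} {x : Int} (h : ∀ t ∈ l, ¬ t ≤ x) : cntLE l x = 0 := by
  unfold cntLE
  rw [List.countP_eq_zero.mpr (fun t ht => by simpa using h t ht)]
  rfl

-- the heart: folding A's merged event list equals the running max of the rank
-- difference t ↦ c + #{starts ≤ t} - #{ends ≤ t} over the start list
lemma merge_fold : ∀ (S E : List Int), S.Pairwise (· ≤ ·) → E.Pairwise (· ≤ ·) →
    ∀ (c m : Int), c ≤ m →
    ((mergeE S E).foldl stepA (c, m)).2 = mfold (fun t => c + cntLE S t - cntLE E t) m S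
  | [], es, _, _, c, m, h => by
    simp only [mergeE, mfold, List.foldl_nil]
    exact foldl_ends_only es c m h
  | s :: ss, [], hS, hE, c, m, h => by
    simp only [mergeE, List.foldl_cons]
    show (List.foldl stepA (c + 1, max m (c + 1)) (mergeE ss [])).2 = _
    rw [merge_fold ss [] hS.tail hE (c + 1) (max m (c + 1)) (le_max_right _ _), mfold_cons]
    have hss : ∀ t ∈ ss, s ≤ t := fun t ht => List.rel_of_pairwise_cons hS ht
    have hcnt : ∀ t ∈ ss, cntLE (s :: ss) t = 1 + cntLE ss t :=
      fun t ht => cntLE_cons_le ss (hss t ht)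
    have hcongr : mfold (fun t => c + cntLE (s :: ss) t - cntLE [] t)
        (max m (c + cntLE (s :: ss) s - cntLE [] s)) ss
        = mfold (fun t => c + 1 + cntLE ss t - cntLE ([] : List Int) t)
            (max m (c + cntLE (s :: ss) s - cntLE [] s)) ss := by
      apply mfold_congr
      intro t ht; rw [hcnt t ht]; ring
    rw [hcongr]
    have hs0 : c + cntLE (s :: ss) s - cntLE [] s = c + 1 + cntLE ss s := by
      rw [cntLE_cons_le ss (le_refl s), cntLE_nil]; ring
    rw [hs0]
    rw [mfold_pad (fun t => c + 1 + cntLE ss t - cntLE ([] : List Int) t) m c (cntLE ss s) ss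
      (cntLE_nonneg ss s) ?_]
    intro hk
    obtain ⟨t0, ht0, hle⟩ := cntLE_pos_mem hk
    have : t0 = s := le_antisymm hle (hss t0 ht0)
    subst this
    refine ⟨t0, ht0, ?_⟩
    show c + 1 + cntLE ss t0 - cntLE [] t0 = c + 1 + cntLE ss t0
    rw [cntLE_nil]; ring
  | s :: ss, e :: es, hS, hE, c, m, h => by
    by_cases hc : e ≤ s
    · simp only [mergeE, if_pos hc, List.foldl_cons]
      show (List.foldl stepA (c + -1, max m (c + -1)) (mergeE (s :: ss) es)).2 = _
      have hm : max m (c + -1) = m := max_eq_left (by omega)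
      rw [hm]
      rw [merge_fold (s :: ss) es hS hE.tail (c + -1) m (by omega)]
      apply mfold_congr
      intro t ht
      have hst : s ≤ t := by
        rcases List.mem_cons.mp ht with rfl | ht'
        · exact le_refl t
        · exact List.rel_of_pairwise_cons hS ht'
      rw [cntLE_cons_le es (le_trans hc hst)]
      ring
    · simp only [mergeE, if_neg hc, List.foldl_cons]
      show (List.foldl stepA (c + 1, max m (c + 1)) (mergeE ss (e :: es))).2 = _
      rw [merge_fold ss (e :: es) hS.tail hE (c + 1) (max m (c + 1)) (le_max_right _ _), mfold_cons]
      have hss : ∀ t ∈ ss, s ≤ t := fun t ht => List.rel_of_pairwise_cons hS ht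
      have hE0 : cntLE (e :: es) s = 0 := by
        apply cntLE_eq_zero
        intro t ht
        rcases List.mem_cons.mp ht with rfl | ht'
        · omega
        · have := List.rel_of_pairwise_cons hE ht'; omega
      have hcongr : mfold (fun t => c + cntLE (s :: ss) t - cntLE (e :: es) t)
          (max m (c + cntLE (s :: ss) s - cntLE (e :: es) s)) ss
          = mfold (fun t => c + 1 + cntLE ss t - cntLE (e :: es) t)
              (max m (c + cntLE (s :: ss) s - cntLE (e :: es) s)) ss := by
        apply mfold_congr
        intro t ht; rw [cntLE_cons_le ss (hss t ht)]; ring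
      rw [hcongr]
      have hs0 : c + cntLE (s :: ss) s - cntLE (e :: es) s = c + 1 + cntLE ss s := by
        rw [cntLE_cons_le ss (le_refl s), hE0]; ring
      rw [hs0]
      rw [mfold_pad (fun t => c + 1 + cntLE ss t - cntLE (e :: es) t) m c (cntLE ss s) ss
        (cntLE_nonneg ss s) ?_]
      intro hk
      obtain ⟨t0, ht0, hle⟩ := cntLE_pos_mem hk
      have ht0s : t0 = s := le_antisymm hle (hss t0 ht0)
      subst ht0s
      refine ⟨t0, ht0, ?_⟩
      show c + 1 + cntLE ss t0 - cntLE (e :: es) t0 = c + 1 + cntLE ss t0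
      rw [hE0]; ring

-- bisect_right on a sorted list is the rank #{y ≤ x}
lemma bisectRight_eq_cntLE (l : List Int) (x : Int) (hl : l.Pairwise (· ≤ ·)) :
    (PySem.List.bisectRight l x : Int) = cntLE l x := by
  obtain ⟨hle, hlt, hgt⟩ := PySem.List.bisectRight_spec l x hl
  set k := PySem.List.bisectRight l x with hk
  have hcount : l.countP (fun y => decide (y ≤ x)) = k := by
    conv_lhs => rw [← List.take_append_drop k l]
    rw [List.countP_append]
    have h1 : (l.take k).countP (fun y => decide (y ≤ x)) = k := by
      have hlen : (l.take k).length = k := by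
        rw [List.length_take]; omega
      rw [List.countP_eq_length.mpr ?_, hlen]
      intro a ha
      obtain ⟨i, hi, rfl⟩ := List.mem_iff_getElem.mp ha
      have hik : i < k := by rw [hlen] at hi; exact hi
      have hil : i < l.length := by omega
      rw [List.getElem_take]
      simpa using hlt i hil hik
    have h2 : (l.drop k).countP (fun y => decide (y ≤ x)) = 0 := by
      rw [List.countP_eq_zero]
      intro a ha
      obtain ⟨i, hi, rfl⟩ := List.mem_iff_getElem.mp ha
      rw [List.getElem_drop]
      have hil : k + i < l.length := by
        rw [List.length_drop] at hi; omega
      simpa using not_le.mpr (hgt (k + i) hil (by omega))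
    rw [h1, h2]
    omega
  unfold cntLE
  rw [hcount]

-- B's step is a running max
lemma if_gt_eq_max (b h : Int) : (if h > b then h else b) = max b h := by
  rcases le_total h b with hc | hc
  · rw [max_eq_left hc, if_neg (by omega)]
  · rw [max_eq_right hc]
    split_ifs with hgt
    · rfl
    · omega

-- ===== VERDICT (by name: the statement is the Claim_ definition above) =====
theorem solveV_spec : Claim_equal_solveV := by
  intro nums n _
  unfold Spec_solveV
  simp only [solveV, solveV_alt]
  rw [sorted2_eq_mergeE nums]
  rw [show (fun (st : Int × Int) ev => (st.1 + ev.2, max st.2 (st.1 + ev.2))) = stepA from rfl]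
  set S := PySem.List.sorted (nums.map Prod.fst) (fun x => x) with hSdef
  set E := PySem.List.sorted (nums.map Prod.snd) (fun x => x) with hEdef
  have hSp : S.Pairwise (· ≤ ·) := PySem.List.sorted_pairwise (nums.map Prod.fst) (fun x => x)
  have hEp : E.Pairwise (· ≤ ·) := PySem.List.sorted_pairwise (nums.map Prod.snd) (fun x => x)
  rw [merge_fold S E hSp hEp 0 0 le_rfl]
  have hB : nums.foldl (fun best p =>
      let here : Int := (PySem.List.bisectRight S p.1 : Int) - (PySem.List.bisectRight E p.1 : Int)
      if here > best then here else best) 0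
      = mfold (fun t => 0 + cntLE S t - cntLE E t) 0 S := by
    have h1 : nums.foldl (fun best p =>
        let here : Int := (PySem.List.bisectRight S p.1 : Int) - (PySem.List.bisectRight E p.1 : Int)
        if here > best then here else best) 0
        = nums.foldl (fun best p => max best (0 + cntLE S p.1 - cntLE E p.1)) 0 := by
      apply PySem.List.foldl_congr_mem
      intro acc p _
      show (if _ > acc then _ else acc) = _
      rw [if_gt_eq_max, bisectRight_eq_cntLE S p.1 hSp, bisectRight_eq_cntLE E p.1 hEp]
      ring_nf
    rw [h1]
    have h2 : nums.foldl (fun best p => max best (0 + cntLE S p.1 - cntLE E p.1)) 0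
        = mfold (fun t => 0 + cntLE S t - cntLE E t) 0 (nums.map Prod.fst) := by
      unfold mfold
      rw [List.foldl_map]
    rw [h2]
    exact mfold_perm _ (PySem.List.sorted_perm (nums.map Prod.fst) (fun x => x) false).symm 0
  rw [hB]
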